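-- pv_equiv track=rewrite | github.com/wilmurillo-ai/Design-Assistant | .skills/openclaw-skills/skills/aipoch-ai/reference-style-sync/scripts/main.py | fix_title_case
-- ===== SOURCE A (Python) =====
-- def fix_title_case(title: str, style: str = 'ama') -> str:
--     """Fix title case"""
--     if not title:
--         return ''
--
--     if style == 'ama':
--         # AMA: Capitalize the first letter, capitalize the first letter after the colon
--         words = title.split()
--         result = []
--         capitalize_next = True
--
--         small_words = {'a', 'an', 'the', 'and', 'but', 'or', 'for', 'nor',
--                       'on', 'at', 'to', 'from', 'by', 'in', 'of', 'with'}
--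
--         for i, word in enumerate(words):
--             if capitalize_next:
--                 result.append(word.capitalize())
--                 capitalize_next = False
--             elif word.lower() in small_words and i > 0:
--                 result.append(word.lower())
--             else:
--                 result.append(word.capitalize())
--
--             if word.endswith(':') or word.endswith('?'):
--                 capitalize_next = True
--
--         return ' '.join(result)
--     else:
--         return title
-- ===== SOURCE B (Python) =====
-- def fix_title_case(title: str, style: str = 'ama') -> str:
--     """Fix title case"""
--     if not title:
--         return ''
--     if style != 'ama':
--         return title
--
--     small_words = {'a', 'an', 'the', 'and', 'but', 'or', 'for', 'nor',
--                   'on', 'at', 'to', 'from', 'by', 'in', 'of', 'with'}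
--
--     # Stage 1: group the words into clauses; a clause ends at a word ending in ':' or '?'.
--     clauses = []
--     cur = []
--     for w in title.split():
--         cur.append(w)
--         if w.endswith(':') or w.endswith('?'):
--             clauses.append(cur)
--             cur = []
--     if cur:
--         clauses.append(cur)
--
--     # Stage 2: capitalize each clause independently: head capitalized,
--     # later words lowercased if small, else capitalized.
--     def cap_clause(cl):
--         return [cl[0].capitalize()] + \
--                [w.lower() if w.lower() in small_words else w.capitalize() for w in cl[1:]]
--
--     return ' '.join(w for cl in clauses for w in cap_clause(cl))
-- ===== Notes on version B (the rewrite author's own statement) =====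
-- stated objective: alternative
-- what changed: Replaces A's single pass with a threaded capitalize_next flag by a two-stage algorithm: first group the words into clauses delimited by words ending in ':' or '?', then capitalize each clause independently (head capitalized, later small words lowercased) and flatten.
import Mathlib
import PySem

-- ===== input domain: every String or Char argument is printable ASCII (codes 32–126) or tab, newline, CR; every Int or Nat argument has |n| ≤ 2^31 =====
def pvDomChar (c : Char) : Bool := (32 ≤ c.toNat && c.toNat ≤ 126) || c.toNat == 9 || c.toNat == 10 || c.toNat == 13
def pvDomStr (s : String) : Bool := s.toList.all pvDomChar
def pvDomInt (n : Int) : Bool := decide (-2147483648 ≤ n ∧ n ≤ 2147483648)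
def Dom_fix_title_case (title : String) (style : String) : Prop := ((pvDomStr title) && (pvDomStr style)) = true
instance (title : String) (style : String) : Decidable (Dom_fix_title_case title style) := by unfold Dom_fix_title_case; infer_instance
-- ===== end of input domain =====

-- B replaces A's single pass with a threaded capitalize_next flag by a two-stage
-- algorithm: group words into clauses at ':'/'?' boundaries, then capitalize each
-- clause independently and flatten (objective: alternative, same cost).

-- shared vocabulary of both ports
def pvSmallWords : List String := ["a", "an", "the", "and", "but", "or", "for", "nor",
    "on", "at", "to", "from", "by", "in", "of", "with"]

-- hand port of str.capitalize(): first char uppercased, rest lowercased (exact on the ASCII Dom)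
def pyCapitalize (s : String) : String :=
  match s.toList with
  | [] => ""
  | c :: cs => String.ofList (PySem.Chars.upperChar c :: PySem.Chars.lower cs)

def pvBoundary (w : String) : Bool :=
  PySem.Str.endswith w ":" || PySem.Str.endswith w "?"

-- ===== PORT A =====
def pvStepA (st : List String × Bool) (p : Int × String) : List String × Bool :=
  let i := p.1
  let word := p.2
  let st1 :=
    if st.2 then (st.1 ++ [pyCapitalize word], false)
    else if pvSmallWords.contains (PySem.Str.lower word) && decide (0 < i) then
      (st.1 ++ [PySem.Str.lower word], st.2)
    else (st.1 ++ [pyCapitalize word], st.2)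
  if pvBoundary word then (st1.1, true) else st1

def fix_title_case (title : String) (style : String) : String :=
  if title = "" then ""
  else if style = "ama" then
    let words := PySem.Str.split₀ title
    let res := (PySem.List.enumerate words 0).foldl pvStepA ([], true)
    PySem.Str.join " " res.1
  else title

-- ===== PORT B =====
-- stage 1: group words into clauses; a clause ends at a word ending in ':' or '?'
def pvStepB (st : List (List String) × List String) (w : String) : List (List String) × List String :=
  let cur := st.2 ++ [w]
  if pvBoundary w then (st.1 ++ [cur], []) else (st.1, cur)

-- stage 2: capitalize one clause: head capitalized, later small words lowercased
def pvCapClause : List String → List String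
  | [] => []
  | h :: t => pyCapitalize h ::
      t.map (fun w => if pvSmallWords.contains (PySem.Str.lower w) then PySem.Str.lower w
                      else pyCapitalize w)

def fix_title_case_alt (title : String) (style : String) : String :=
  if title = "" then ""
  else if style = "ama" then
    let st := (PySem.Str.split₀ title).foldl pvStepB ([], [])
    let clauses := if st.2 = [] then st.1 else st.1 ++ [st.2]
    PySem.Str.join " " (clauses.flatMap pvCapClause)
  else title

-- ===== PRECONDITION & SPEC =====
def Spec_fix_title_case (title : String) (style : String) (out : String) : Prop := out = fix_title_case_alt title style
instance (title : String) (style : String) (out : String) : Decidable (Spec_fix_title_case title style out) := by unfold Spec_fix_title_case; infer_instance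

-- ===== CLAIM (what is proved, stated in full; the proofs are below) =====
def Claim_equal_fix_title_case : Prop := ∀ (title : String) (style : String), Dom_fix_title_case title style → Spec_fix_title_case title style (fix_title_case title style)

-- ===== LEMMAS AND PROOFS =====

-- the per-word rule when no capitalization is forced
def pvLowRule (w : String) : String :=
  if pvSmallWords.contains (PySem.Str.lower w) then PySem.Str.lower w else pyCapitalize w

-- common reference recursion both ports are reduced to
def pvR : List String → Bool → List String
  | [], _ => []
  | w :: ws, flag =>
    (if flag then pyCapitalize w else pvLowRule w) :: pvR ws (pvBoundary w)

lemma pvCapClause_append (cur : List String) (w : String) (h : cur ≠ []) :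
    pvCapClause (cur ++ [w]) = pvCapClause cur ++ [pvLowRule w] := by
  cases cur with
  | nil => simp at h
  | cons c cs => simp [pvCapClause, pvLowRule]

lemma pvLoopB_eq (ws : List String) :
    ∀ (done : List (List String)) (cur : List String),
    (let st := ws.foldl pvStepB (done, cur)
     ((if st.2 = [] then st.1 else st.1 ++ [st.2]).flatMap pvCapClause))
      = done.flatMap pvCapClause ++ pvCapClause cur ++ pvR ws cur.isEmpty := by
  induction ws with
  | nil =>
    intro done cur
    cases cur <;> simp [pvR, pvCapClause]
  | cons w rest ih =>
    intro done cur
    by_cases hb : pvBoundary w = true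
    · have hrec := ih (done ++ [cur ++ [w]]) []
      simp only [List.foldl_cons, pvStepB, hb, if_true]
      rw [hrec]
      cases hcur : cur.isEmpty
      · have hne : cur ≠ [] := by cases cur <;> simp_all
        simp only [List.flatMap_append, List.flatMap_cons, List.flatMap_nil,
          List.append_nil, pvCapClause_append cur w hne]
        simp [pvR, hb, pvCapClause]
      · have hnil : cur = [] := by cases cur <;> simp_all
        subst hnil
        simp [pvR, hb, pvCapClause]
    · have hb' : pvBoundary w = false := by simpa using hb
      have hrec := ih done (cur ++ [w])
      simp only [List.foldl_cons, pvStepB, hb', if_false, Bool.false_eq_true]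
      rw [hrec]
      have hne2 : (cur ++ [w]).isEmpty = false := by simp
      cases hcur : cur.isEmpty
      · have hne : cur ≠ [] := by cases cur <;> simp_all
        simp only [pvCapClause_append cur w hne, hne2]
        simp [pvR, hb']
      · have hnil : cur = [] := by cases cur <;> simp_all
        subst hnil
        simp [pvR, hb', pvCapClause]

lemma pvLoopA_eq (ps : List (Int × String)) :
    ∀ (acc : List String) (flag : Bool),
    (flag = false → ∀ p ∈ ps.take 1, 0 < p.1) →
    (∀ p ∈ ps.drop 1, 0 < p.1) →
    (ps.foldl pvStepA (acc, flag)).1 = acc ++ pvR (ps.map Prod.snd) flag := by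
  induction ps with
  | nil => intro acc flag _ _; simp [pvR]
  | cons p rest ih =>
    intro acc flag hhead htail
    have htail' : ∀ q ∈ rest, 0 < q.1 := fun q hq => htail q hq
    have hstep : pvStepA (acc, flag) p
        = (acc ++ [if flag then pyCapitalize p.2 else pvLowRule p.2], pvBoundary p.2) := by
      by_cases hf : flag = true
      · by_cases he : pvBoundary p.2 = true <;> simp_all [pvStepA]
      · have hf' : flag = false := by simpa using hf
        have hi : 0 < p.1 := hhead hf' p (by simp)
        by_cases hs : pvSmallWords.contains (PySem.Str.lower p.2) = true <;>
          by_cases he : pvBoundary p.2 = true <;>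
          simp_all [pvStepA, pvLowRule]
    have hrest := ih (acc ++ [if flag then pyCapitalize p.2 else pvLowRule p.2]) (pvBoundary p.2)
      (fun _ q hq => htail' q (List.mem_of_mem_take hq))
      (fun q hq => htail' q (List.mem_of_mem_drop hq))
    simp only [List.foldl_cons, hstep]
    rw [hrest]
    simp [pvR, List.append_assoc]

lemma pvEnumerate_pos (ws : List String) :
    ∀ p ∈ (PySem.List.enumerate ws 0).drop 1, 0 < p.1 := by
  cases ws with
  | nil => simp [PySem.List.enumerate]
  | cons w rest =>
    intro p hp
    rw [PySem.List.enumerate_cons] at hp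
    simp only [List.drop_succ_cons, List.drop_zero] at hp
    rcases (PySem.List.mem_enumerate_iff _ _ _).1 hp with ⟨k, hk, rfl⟩
    omega

-- ===== VERDICT (by name: the statement is the Claim_ definition above) =====
theorem fix_title_case_spec : Claim_equal_fix_title_case := by
  intro title style _
  unfold Spec_fix_title_case fix_title_case fix_title_case_alt
  by_cases h0 : title = ""
  · simp [h0]
  · by_cases h1 : style = "ama"
    · simp only [h0, h1, if_false, if_true]
      have hA := pvLoopA_eq (PySem.List.enumerate (PySem.Str.split₀ title) 0) [] true
        (by simp) (pvEnumerate_pos _)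
      have hB := pvLoopB_eq (PySem.Str.split₀ title) [] []
      simp only [List.isEmpty_nil] at hB
      rw [hA]
      simp only [PySem.List.map_snd_enumerate] at *
      simp [hB, pvCapClause]
    · simp [h0, h1]
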